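-- pv_equiv track=rewrite | github.com/yuki-saikai/saikai-places-api | main.py | _match_restaurant_by_name
-- ===== SOURCE A (Python) =====
-- from typing import Dict, List, Optional
--
-- def _match_restaurant_by_name(
--     gemini_name: str, google_restaurants: List[Dict]
-- ) -> Optional[Dict]:
--     """
--     Match a restaurant name from Gemini response with Google Maps data.
--     Uses exact match first, then falls back to partial match.
--
--     Args:
--         gemini_name: Restaurant name from Gemini response
--         google_restaurants: List of restaurants from Google Maps API
--
--     Returns:
--         Matched restaurant data or None if no match found
--     """
--     # Step 1: Exact match (case-sensitive)
--     for restaurant in google_restaurants: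
--         if restaurant["name"] == gemini_name:
--             return restaurant
--
--     # Step 2: Exact match (case-insensitive)
--     gemini_name_lower = gemini_name.lower()
--     for restaurant in google_restaurants:
--         if restaurant["name"].lower() == gemini_name_lower:
--             return restaurant
--
--     # Step 3: Partial match (contains)
--     for restaurant in google_restaurants:
--         # Check if Gemini name is contained in Google name
--         if gemini_name in restaurant["name"] or restaurant["name"] in gemini_name:
--             return restaurant
--         # Case-insensitive partial match
--         if (
--             gemini_name_lower in restaurant["name"].lower()
--             or restaurant["name"].lower() in gemini_name_lower
--         ):
--             return restaurant
--
--     # No match found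
--     return None
-- ===== SOURCE B (Python) =====
-- from typing import Dict, List, Optional
--
--
-- def _match_restaurant_by_name(
--     gemini_name: str, google_restaurants: List[Dict]
-- ) -> Optional[Dict]:
--     """Single pass: return at once on an exact match; otherwise assign each
--     restaurant a tier (2 case-insensitive, 3 containment) and keep the first
--     restaurant of the best tier seen so far."""
--     gl = gemini_name.lower()
--     best_tier = 4
--     best = None
--     for restaurant in google_restaurants:
--         name = restaurant["name"]
--         if name == gemini_name:
--             return restaurant
--         if name.lower() == gl:
--             tier = 2
--         elif (
--             gemini_name in name
--             or name in gemini_name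
--             or gl in name.lower()
--             or name.lower() in gl
--         ):
--             tier = 3
--         else:
--             continue
--         if tier < best_tier:
--             best_tier = tier
--             best = restaurant
--     return best
-- ===== Notes on version B (the rewrite author's own statement) =====
-- stated objective: alternative
-- what changed: Replaces A's three sequential scans (exact, case-insensitive, containment) by a single pass that returns at the first exact match and otherwise keeps the first restaurant of the strictly best tier (2 case-insensitive, 3 containment).
import Mathlib
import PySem

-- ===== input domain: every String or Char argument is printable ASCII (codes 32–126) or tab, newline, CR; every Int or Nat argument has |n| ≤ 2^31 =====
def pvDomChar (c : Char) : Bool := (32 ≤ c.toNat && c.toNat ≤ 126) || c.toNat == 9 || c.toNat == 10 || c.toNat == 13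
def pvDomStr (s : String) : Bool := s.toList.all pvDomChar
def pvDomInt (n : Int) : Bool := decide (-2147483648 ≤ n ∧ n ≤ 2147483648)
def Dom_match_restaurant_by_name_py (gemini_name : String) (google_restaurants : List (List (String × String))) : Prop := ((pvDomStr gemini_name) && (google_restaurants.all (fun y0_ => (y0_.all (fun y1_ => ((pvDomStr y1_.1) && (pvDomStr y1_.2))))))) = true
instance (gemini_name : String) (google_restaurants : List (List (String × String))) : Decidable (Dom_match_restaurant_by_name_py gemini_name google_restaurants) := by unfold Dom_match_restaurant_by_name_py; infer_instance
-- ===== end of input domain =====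

-- B replaces A's three sequential scans by one pass that returns at the first exact match
-- and otherwise keeps the first restaurant of the best tier (objective: alternative, same O(n) cost).

-- ===== PORT A =====
-- restaurant["name"]; Pre_ guarantees the key is present wherever the Python reads it, so getD "" is never reached on admitted inputs
def pvName (r : List (String × String)) : String := ((PySem.Dict.mk r).get? "name").getD ""

def match_restaurant_by_name_py (gemini_name : String) (google_restaurants : List (List (String × String))) : Option (List (String × String)) :=
  -- Step 1: exact match (case-sensitive)
  match google_restaurants.find? (fun r => pvName r == gemini_name) with
  | some r => some r
  | none =>
    -- Step 2: exact match (case-insensitive)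
    let gl := PySem.Str.lower gemini_name
    match google_restaurants.find? (fun r => PySem.Str.lower (pvName r) == gl) with
    | some r => some r
    | none =>
      -- Step 3: partial match (the two ifs both return, i.e. their disjunction)
      google_restaurants.find? (fun r =>
        PySem.Str.isIn gemini_name (pvName r) || PySem.Str.isIn (pvName r) gemini_name ||
        (PySem.Str.isIn gl (PySem.Str.lower (pvName r)) || PySem.Str.isIn (PySem.Str.lower (pvName r)) gl))

-- ===== PORT B =====
-- B's loop: early return on exact match, otherwise strict-improvement update of (best_tier, best)
def pvAltGo (g gl : String) (bt : Nat) (best : Option (List (String × String))) :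
    List (List (String × String)) → Option (List (String × String))
  | [] => best
  | r :: rest =>
    let name := pvName r
    if name == g then some r
    else
      let t : Nat :=
        if PySem.Str.lower name == gl then 2
        else if PySem.Str.isIn g name || PySem.Str.isIn name g ||
                (PySem.Str.isIn gl (PySem.Str.lower name) || PySem.Str.isIn (PySem.Str.lower name) gl) then 3
        else 4  -- 'continue': tier 4 never beats best_tier
      if t < bt then pvAltGo g gl t (some r) rest else pvAltGo g gl bt best rest

def match_restaurant_by_name_py_alt (gemini_name : String) (google_restaurants : List (List (String × String))) : Option (List (String × String)) :=
  pvAltGo gemini_name (PySem.Str.lower gemini_name) 4 none google_restaurants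

-- ===== PRECONDITION & SPEC =====
-- Pre_ excludes exactly the inputs on which Python raises KeyError (a restaurant without a
-- "name" key occurring at or before the first exact match, i.e. before any early return);
-- both A and B raise there, on every other input both return.
def Pre_match_restaurant_by_name_py (gemini_name : String) (google_restaurants : List (List (String × String))) : Prop :=
  ∀ r ∈ google_restaurants.takeWhile (fun r => !(((PySem.Dict.mk r).get? "name") == some gemini_name)),
    (((PySem.Dict.mk r).get? "name")).isSome = true

instance (gemini_name : String) (google_restaurants : List (List (String × String))) : Decidable (Pre_match_restaurant_by_name_py gemini_name google_restaurants) := by unfold Pre_match_restaurant_by_name_py; infer_instance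

def pvWitness_match_restaurant_by_name_py : String × (List (List (String × String))) :=
  ("Cafe", [[("name", "cafe bar")], [("name", "CAFE"), ("rating", "4")]])

def Spec_match_restaurant_by_name_py (gemini_name : String) (google_restaurants : List (List (String × String))) (out : Option (List (String × String))) : Prop := out = match_restaurant_by_name_py_alt gemini_name google_restaurants
instance (gemini_name : String) (google_restaurants : List (List (String × String))) (out : Option (List (String × String))) : Decidable (Spec_match_restaurant_by_name_py gemini_name google_restaurants out) := by unfold Spec_match_restaurant_by_name_py; infer_instance

-- ===== CLAIM =====
def Claim_equal_match_restaurant_by_name_py : Prop := ∀ (gemini_name : String) (google_restaurants : List (List (String × String))), Dom_match_restaurant_by_name_py gemini_name google_restaurants → Pre_match_restaurant_by_name_py gemini_name google_restaurants → Spec_match_restaurant_by_name_py gemini_name google_restaurants (match_restaurant_by_name_py gemini_name google_restaurants)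

-- ===== LEMMAS AND PROOFS =====

set_option maxHeartbeats 1000000

-- shorthands for A's three predicates (proof-only)
def pvC1 (g : String) (r : List (String × String)) : Bool := pvName r == g
def pvC2 (gl : String) (r : List (String × String)) : Bool := PySem.Str.lower (pvName r) == gl
def pvC3 (g gl : String) (r : List (String × String)) : Bool :=
  PySem.Str.isIn g (pvName r) || PySem.Str.isIn (pvName r) g ||
  (PySem.Str.isIn gl (PySem.Str.lower (pvName r)) || PySem.Str.isIn (PySem.Str.lower (pvName r)) gl)

lemma pvGo_two (g gl : String) (l : List (List (String × String))) (y : List (String × String)) :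
    pvAltGo g gl 2 (some y) l =
      match l.find? (pvC1 g) with
      | some x => some x
      | none => some y := by
  induction l with
  | nil => rfl
  | cons r l ih =>
    by_cases h1 : pvC1 g r
    · have h1' : pvName r = g := by simpa [pvC1] using h1
      have hthis : pvAltGo g gl 2 (some y) (r :: l) = some r := by simp [pvAltGo, h1']
      simp [hthis, h1]
    · have h1' : ¬ pvName r = g := by simpa [pvC1] using h1
      have hthis : pvAltGo g gl 2 (some y) (r :: l) = pvAltGo g gl 2 (some y) l := by
        simp [pvAltGo, beq_iff_eq, h1']
        split_ifs <;> norm_num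
      rw [hthis, ih]
      simp [h1]

lemma pvGo_three (g gl : String) (l : List (List (String × String))) (z : List (String × String)) :
    pvAltGo g gl 3 (some z) l =
      match l.find? (pvC1 g) with
      | some x => some x
      | none =>
        match l.find? (pvC2 gl) with
        | some y => some y
        | none => some z := by
  induction l with
  | nil => rfl
  | cons r l ih =>
    by_cases h1 : pvC1 g r
    · have h1' : pvName r = g := by simpa [pvC1] using h1
      have hthis : pvAltGo g gl 3 (some z) (r :: l) = some r := by simp [pvAltGo, h1']
      simp [hthis, h1]
    · have h1' : ¬ pvName r = g := by simpa [pvC1] using h1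
      by_cases h2 : pvC2 gl r
      · have h2' : (PySem.Str.lower (pvName r) == gl) = true := by
          simpa only [pvC2] using h2
        have hthis : pvAltGo g gl 3 (some z) (r :: l) = pvAltGo g gl 2 (some r) l := by
          simp [pvAltGo, beq_iff_eq, h1', h2']
        rw [hthis, pvGo_two]
        simp [h1, h2]
      · have h2' : (PySem.Str.lower (pvName r) == gl) = false := by
          simpa only [pvC2, Bool.not_eq_true] using h2
        have hthis : pvAltGo g gl 3 (some z) (r :: l) = pvAltGo g gl 3 (some z) l := by
          simp [pvAltGo, beq_iff_eq, h1', h2']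
          split_ifs <;> norm_num
        rw [hthis, ih]
        simp [h1, h2]

lemma pvGo_main (g gl : String) (l : List (List (String × String))) :
    pvAltGo g gl 4 none l =
      match l.find? (pvC1 g) with
      | some x => some x
      | none =>
        match l.find? (pvC2 gl) with
        | some y => some y
        | none => l.find? (pvC3 g gl) := by
  induction l with
  | nil => rfl
  | cons r l ih =>
    by_cases h1 : pvC1 g r
    · have h1' : pvName r = g := by simpa [pvC1] using h1
      have hthis : pvAltGo g gl 4 none (r :: l) = some r := by simp [pvAltGo, h1']
      simp [hthis, h1]
    · have h1' : ¬ pvName r = g := by simpa [pvC1] using h1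
      by_cases h2 : pvC2 gl r
      · have h2' : (PySem.Str.lower (pvName r) == gl) = true := by
          simpa only [pvC2] using h2
        have hthis : pvAltGo g gl 4 none (r :: l) = pvAltGo g gl 2 (some r) l := by
          simp [pvAltGo, beq_iff_eq, h1', h2']
        rw [hthis, pvGo_two]
        simp [h1, h2]
      · have h2' : (PySem.Str.lower (pvName r) == gl) = false := by
          simpa only [pvC2, Bool.not_eq_true] using h2
        by_cases h3 : pvC3 g gl r
        · have h3' : (PySem.Str.isIn g (pvName r) || PySem.Str.isIn (pvName r) g ||
              (PySem.Str.isIn gl (PySem.Str.lower (pvName r)) ||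
               PySem.Str.isIn (PySem.Str.lower (pvName r)) gl)) = true := by
            simpa only [pvC3] using h3
          have hthis : pvAltGo g gl 4 none (r :: l) = pvAltGo g gl 3 (some r) l := by
            simp [pvAltGo, beq_iff_eq, h1', h2']
            split_ifs with hca <;>
              first
                | rfl
                | omega
                | (exfalso; simp [PySem.Str.isIn, PySem.Str.toList_lower] at h3'; simp_all)
          rw [hthis, pvGo_three]
          simp [h1, h2, h3]
        · have h3' : (PySem.Str.isIn g (pvName r) || PySem.Str.isIn (pvName r) g ||
              (PySem.Str.isIn gl (PySem.Str.lower (pvName r)) ||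
               PySem.Str.isIn (PySem.Str.lower (pvName r)) gl)) = false := by
            simpa only [pvC3, Bool.not_eq_true] using h3
          have hthis : pvAltGo g gl 4 none (r :: l) = pvAltGo g gl 4 none l := by
            simp [pvAltGo, beq_iff_eq, h1', h2']
            split_ifs with hca <;>
              first
                | rfl
                | omega
                | (exfalso; simp [PySem.Str.isIn, PySem.Str.toList_lower] at h3'; simp_all)
          rw [hthis, ih]
          simp [h1, h2, h3]

-- ===== VERDICT =====
theorem match_restaurant_by_name_py_spec : Claim_equal_match_restaurant_by_name_py := by
  intro g rs _dom _pre
  unfold Spec_match_restaurant_by_name_py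
  have hA : match_restaurant_by_name_py g rs =
      match rs.find? (pvC1 g) with
      | some r => some r
      | none =>
        match rs.find? (pvC2 (PySem.Str.lower g)) with
        | some r => some r
        | none => rs.find? (pvC3 g (PySem.Str.lower g)) := rfl
  have hB : match_restaurant_by_name_py_alt g rs = pvAltGo g (PySem.Str.lower g) 4 none rs := rfl
  rw [hA, hB, pvGo_main]
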